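-- pv_equiv track=rewrite | github.com/paulklemstine/factor | test_block_lanczos_v2.py | decode_deps
-- ===== SOURCE A (Python) =====
-- def decode_deps(deps_buf, ndeps, nrows):
--     nwords = (nrows + 63) // 64
--     result = []
--     for d in range(ndeps):
--         indices = []
--         off = d * nwords
--         for w in range(nwords):
--             bits = deps_buf[off + w]
--             base = w * 64
--             while bits:
--                 lsb = bits & (-bits)
--                 idx = base + lsb.bit_length() - 1
--                 if idx < nrows:
--                     indices.append(idx)
--                 bits ^= lsb
--         if indices:
--             result.append(sorted(indices))
--     return result
-- ===== SOURCE B (Python) =====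
-- def _word_indices(bits, base, nrows):
--     """Row indices encoded in one 64-bit word: scan bit positions in
--     ascending order by repeatedly shifting the word right."""
--     out = []
--     b = 0
--     while bits:
--         if bits & 1:
--             idx = base + b
--             if idx < nrows:
--                 out.append(idx)
--         bits >>= 1
--         b += 1
--     return out
--
--
-- def decode_deps(deps_buf, ndeps, nrows):
--     nwords = (nrows + 63) // 64
--     rows = [
--         sorted(i
--                for w in range(nwords)
--                for i in _word_indices(deps_buf[d * nwords + w], 64 * w, nrows))
--         for d in range(ndeps)
--     ]
--     return [r for r in rows if r]
-- ===== Notes on version B (the rewrite author's own statement) =====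
-- stated objective: simpler
-- what changed: The lsb-isolation trick (bits & -bits, bit_length, xor) is replaced by a plain ascending scan of bit positions (shift right, test the low bit), and the imperative accumulator loops become comprehensions (flatten words, sort, drop empty rows).
import Mathlib
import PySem

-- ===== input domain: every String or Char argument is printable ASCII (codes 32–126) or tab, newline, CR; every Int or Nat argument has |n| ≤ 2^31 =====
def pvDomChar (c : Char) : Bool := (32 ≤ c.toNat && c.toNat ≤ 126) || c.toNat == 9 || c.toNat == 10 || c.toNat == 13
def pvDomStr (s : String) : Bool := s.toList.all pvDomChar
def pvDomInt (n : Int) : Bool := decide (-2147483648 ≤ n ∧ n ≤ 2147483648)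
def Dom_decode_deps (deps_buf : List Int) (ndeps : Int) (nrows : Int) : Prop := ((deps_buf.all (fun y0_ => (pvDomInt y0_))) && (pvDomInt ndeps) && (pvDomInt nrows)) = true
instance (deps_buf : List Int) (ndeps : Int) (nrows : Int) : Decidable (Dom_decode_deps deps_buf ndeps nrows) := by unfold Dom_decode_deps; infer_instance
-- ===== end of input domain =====

-- B replaces A's lsb-isolation inner loop by an ascending shift-and-test bit scan and the
-- accumulator loops by comprehensions (flatten, sort, drop empty rows); same cost, simpler.


-- ===== PORT A =====
-- the `while bits:` loop of A; `bits & (-bits)` is computed on Nat as `bits ^^^ (bits &&& (bits-1))`,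
-- exact for the nonnegative word values Pre_ admits (a negative word makes Python's loop diverge);
-- `lsb.bit_length()` for the power of two lsb is `Nat.log2 lsb + 1`
def lsbInner (bits : Nat) (base nrows : Int) (indices : List Int) : List Int :=
  if _h : bits = 0 then indices
  else
    let rest := bits &&& (bits - 1)
    let lsb := bits ^^^ rest
    let idx := base + ((Nat.log2 lsb + 1 : Nat) : Int) - 1
    lsbInner rest base nrows (if idx < nrows then indices ++ [idx] else indices)
  termination_by bits
  decreasing_by
    have h1 : bits &&& (bits - 1) ≤ bits - 1 := Nat.and_le_right
    omega

def decode_deps (deps_buf : List Int) (ndeps : Int) (nrows : Int) : List (List Int) :=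
  let nwords := PySem.Int.floordiv (nrows + 63) 64
  (PySem.List.pyRange 0 ndeps 1).foldl (fun result d =>
    let off := d * nwords
    let indices := (PySem.List.pyRange 0 nwords 1).foldl (fun indices w =>
      -- deps_buf[off + w]: out-of-range (IndexError) excluded by Pre_, hence the default;
      -- .toNat agrees with Python on the nonnegative values Pre_ admits
      let bits := (PySem.List.pyGetD deps_buf (off + w) 0).toNat
      let base := w * 64
      lsbInner bits base nrows indices) []
    if indices ≠ [] then result ++ [PySem.List.sorted indices id] else result) []

-- ===== PORT B =====
-- the `while bits:` loop of B's helper _word_indices: shift right, test the low bit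
def wordIndicesGo (bits : Nat) (base : Int) (b : Nat) (nrows : Int) (out : List Int) : List Int :=
  if _h : bits = 0 then out
  else
    wordIndicesGo (bits >>> 1) base (b + 1) nrows
      (if bits &&& 1 = 1 then
        (if base + (b : Int) < nrows then out ++ [base + (b : Int)] else out)
       else out)
  termination_by bits
  decreasing_by
    simp only [Nat.shiftRight_one]
    omega

def decode_deps_alt (deps_buf : List Int) (ndeps : Int) (nrows : Int) : List (List Int) :=
  let nwords := PySem.Int.floordiv (nrows + 63) 64
  let rows := (PySem.List.pyRange 0 ndeps 1).map (fun d =>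
    PySem.List.sorted
      ((PySem.List.pyRange 0 nwords 1).flatMap (fun w =>
        wordIndicesGo (PySem.List.pyGetD deps_buf (d * nwords + w) 0).toNat (64 * w) 0 nrows []))
      id)
  rows.filter (fun r => decide (r ≠ []))

-- ===== PRECONDITION & SPEC =====
-- Pre_ admits exactly the inputs on which Python A returns: every accessed buffer word must
-- exist (else IndexError) and be nonnegative (a negative word makes `while bits:` diverge).
def Pre_decode_deps (deps_buf : List Int) (ndeps : Int) (nrows : Int) : Prop :=
  ∀ d < ndeps.toNat, ∀ w < (PySem.Int.floordiv (nrows + 63) 64).toNat,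
    d * (PySem.Int.floordiv (nrows + 63) 64).toNat + w < deps_buf.length ∧
      0 ≤ deps_buf.getD (d * (PySem.Int.floordiv (nrows + 63) 64).toNat + w) 0
instance (deps_buf : List Int) (ndeps : Int) (nrows : Int) : Decidable (Pre_decode_deps deps_buf ndeps nrows) := by unfold Pre_decode_deps; infer_instance

def pvWitness_decode_deps : List Int × Int × Int := ([3, 5], 2, 64)

def Spec_decode_deps (deps_buf : List Int) (ndeps : Int) (nrows : Int) (out : List (List Int)) : Prop := out = decode_deps_alt deps_buf ndeps nrows
instance (deps_buf : List Int) (ndeps : Int) (nrows : Int) (out : List (List Int)) : Decidable (Spec_decode_deps deps_buf ndeps nrows out) := by unfold Spec_decode_deps; infer_instance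

-- ===== CLAIM (what is proved, stated in full; the proofs are below) =====
def Claim_equal_decode_deps : Prop := ∀ (deps_buf : List Int) (ndeps : Int) (nrows : Int), Dom_decode_deps deps_buf ndeps nrows → Pre_decode_deps deps_buf ndeps nrows → Spec_decode_deps deps_buf ndeps nrows (decode_deps deps_buf ndeps nrows)

-- ===== LEMMAS AND PROOFS =====

-- bit identities on Nat, by testBit extensionality
theorem pv_two_mul_and (a : Nat) (ha : 1 ≤ a) :
    (2 * a) &&& (2 * a - 1) = 2 * (a &&& (a - 1)) := by
  apply Nat.eq_of_testBit_eq
  intro i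
  cases i with
  | zero => simp [Nat.testBit_zero]
  | succ i =>
      have h1 : (2 * a) / 2 = a := by omega
      have h2 : (2 * a - 1) / 2 = a - 1 := by omega
      have h3 : (2 * (a &&& (a - 1))) / 2 = a &&& (a - 1) := by omega
      rw [Nat.testBit_and, Nat.testBit_succ, Nat.testBit_succ, Nat.testBit_succ,
        h1, h2, h3, Nat.testBit_and]

theorem pv_two_mul_xor (a b : Nat) : (2 * a) ^^^ (2 * b) = 2 * (a ^^^ b) := by
  apply Nat.eq_of_testBit_eq
  intro i
  cases i with
  | zero => simp [Nat.testBit_zero]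
  | succ i =>
      have h1 : (2 * a) / 2 = a := by omega
      have h2 : (2 * b) / 2 = b := by omega
      have h3 : (2 * (a ^^^ b)) / 2 = a ^^^ b := by omega
      rw [Nat.testBit_xor, Nat.testBit_succ, Nat.testBit_succ, Nat.testBit_succ,
        h1, h2, h3, Nat.testBit_xor]

theorem pv_odd_and_pred (b : Nat) (hb : b % 2 = 1) : b &&& (b - 1) = b - 1 := by
  apply Nat.eq_of_testBit_eq
  intro i
  cases i with
  | zero => simp [Nat.testBit_zero]; omega
  | succ i =>
      have h2 : (b - 1) / 2 = b / 2 := by omega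
      rw [Nat.testBit_and, Nat.testBit_succ, Nat.testBit_succ, h2, Bool.and_self]

theorem pv_odd_xor_pred (b : Nat) (hb : b % 2 = 1) : b ^^^ (b - 1) = 1 := by
  apply Nat.eq_of_testBit_eq
  intro i
  cases i with
  | zero => simp [Nat.testBit_zero]; omega
  | succ i =>
      have h2 : (b - 1) / 2 = b / 2 := by omega
      rw [Nat.testBit_xor, Nat.testBit_succ, Nat.testBit_succ, Nat.testBit_succ, h2,
        Bool.xor_self]
      simp

theorem pv_lsb_ne_zero (bits : Nat) (h : bits ≠ 0) :
    bits ^^^ (bits &&& (bits - 1)) ≠ 0 := by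
  intro h0
  have he : bits = bits &&& (bits - 1) := Nat.xor_eq_zero_iff.mp h0
  have h1 : bits &&& (bits - 1) ≤ bits - 1 := Nat.and_le_right
  omega

theorem pv_log2_two_mul (x : Nat) (h : 1 ≤ x) : Nat.log2 (2 * x) = Nat.log2 x + 1 := by
  rw [Nat.log2_eq_log_two, Nat.log2_eq_log_two, mul_comm, Nat.log_mul_base (by norm_num) (by omega)]

-- A's loop on a doubled word is A's loop with the base shifted by one
theorem lsbInner_two_mul (m : Nat) : ∀ (base nrows : Int) (acc : List Int),
    lsbInner (2 * m) base nrows acc = lsbInner m (base + 1) nrows acc := by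
  induction m using Nat.strong_induction_on with
  | _ m ih =>
    intro base nrows acc
    by_cases hm : m = 0
    · subst hm; simp [lsbInner]
    · have h2m : 2 * m ≠ 0 := by omega
      conv_lhs => rw [lsbInner]
      conv_rhs => rw [lsbInner]
      rw [dif_neg h2m, dif_neg hm]
      have hand : (2 * m) &&& (2 * m - 1) = 2 * (m &&& (m - 1)) := pv_two_mul_and m (by omega)
      have hxor : (2 * m) ^^^ (2 * (m &&& (m - 1))) = 2 * (m ^^^ (m &&& (m - 1))) :=
        pv_two_mul_xor m (m &&& (m - 1))
      have hlsb : m ^^^ (m &&& (m - 1)) ≠ 0 := pv_lsb_ne_zero m hm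
      have hlog : Nat.log2 (2 * (m ^^^ (m &&& (m - 1)))) = Nat.log2 (m ^^^ (m &&& (m - 1))) + 1 :=
        pv_log2_two_mul _ (by omega)
      simp only [hand, hxor, hlog]
      have hidx : base + ((Nat.log2 (m ^^^ (m &&& (m - 1))) + 1 + 1 : Nat) : Int) - 1
          = base + 1 + ((Nat.log2 (m ^^^ (m &&& (m - 1))) + 1 : Nat) : Int) - 1 := by
        push_cast; ring
      simp only [hidx]
      have hrest : m &&& (m - 1) < m := by
        have : m &&& (m - 1) ≤ m - 1 := Nat.and_le_right
        omega
      exact ih (m &&& (m - 1)) hrest base nrows _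

-- B's loop: shifting the counter is shifting the base
theorem wordIndicesGo_shift (bits : Nat) : ∀ (base : Int) (b : Nat) (nrows : Int) (out : List Int),
    wordIndicesGo bits base (b + 1) nrows out = wordIndicesGo bits (base + 1) b nrows out := by
  induction bits using Nat.strong_induction_on with
  | _ bits ih =>
    intro base b nrows out
    by_cases h0 : bits = 0
    · subst h0; simp [wordIndicesGo]
    · conv_lhs => rw [wordIndicesGo]
      conv_rhs => rw [wordIndicesGo]
      rw [dif_neg h0, dif_neg h0]
      have hb : base + ((b + 1 : Nat) : Int) = base + 1 + (b : Int) := by push_cast; ring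
      rw [hb]
      have hlt : bits >>> 1 < bits := by simp only [Nat.shiftRight_one]; omega
      exact ih (bits >>> 1) hlt base (b + 1) nrows _

-- the two inner loops agree
theorem lsbInner_eq_go (bits : Nat) : ∀ (base nrows : Int) (acc : List Int),
    lsbInner bits base nrows acc = wordIndicesGo bits base 0 nrows acc := by
  induction bits using Nat.strong_induction_on with
  | _ bits ih =>
    intro base nrows acc
    by_cases h0 : bits = 0
    · subst h0; simp [lsbInner, wordIndicesGo]
    · have hhalf : bits / 2 < bits := by omega
      have hshift : bits >>> 1 = bits / 2 := Nat.shiftRight_one bits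
      rcases Nat.mod_two_eq_zero_or_one bits with hpar | hpar
      · -- even: both loops skip bit 0
        conv_rhs => rw [wordIndicesGo]
        rw [dif_neg h0]
        simp only [hshift, Nat.and_one_is_mod, hpar]
        have hsplit : bits = 2 * (bits / 2) := by omega
        have h1 : lsbInner bits base nrows acc = lsbInner (bits / 2) (base + 1) nrows acc := by
          conv_lhs => rw [hsplit]
          exact lsbInner_two_mul (bits / 2) base nrows acc
        rw [h1, ih (bits / 2) hhalf (base + 1) nrows acc, ← wordIndicesGo_shift]
        simp
      · -- odd: both loops emit `base` (if in range) and continue on bits/2 with base+1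
        conv_lhs => rw [lsbInner]
        conv_rhs => rw [wordIndicesGo]
        rw [dif_neg h0, dif_neg h0]
        simp only [hshift, Nat.and_one_is_mod, hpar]
        rw [pv_odd_and_pred bits hpar, pv_odd_xor_pred bits hpar]
        have hlog1 : Nat.log2 1 = 0 := by decide
        rw [hlog1]
        have hidx : base + ((0 + 1 : Nat) : Int) - 1 = base + ((0 : Nat) : Int) := by
          push_cast; ring
        rw [hidx]
        have hsplit : bits - 1 = 2 * (bits / 2) := by omega
        rw [hsplit, lsbInner_two_mul (bits / 2) base nrows _,
          ih (bits / 2) hhalf (base + 1) nrows _, ← wordIndicesGo_shift]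
        simp

-- B's loop threads its accumulator by appending
theorem wordIndicesGo_acc (bits : Nat) : ∀ (base : Int) (b : Nat) (nrows : Int) (out : List Int),
    wordIndicesGo bits base b nrows out = out ++ wordIndicesGo bits base b nrows [] := by
  induction bits using Nat.strong_induction_on with
  | _ bits ih =>
    intro base b nrows out
    by_cases h0 : bits = 0
    · subst h0; simp [wordIndicesGo]
    · conv_lhs => rw [wordIndicesGo]
      conv_rhs => rw [wordIndicesGo]
      rw [dif_neg h0, dif_neg h0]
      have hlt : bits >>> 1 < bits := by simp only [Nat.shiftRight_one]; omega
      rw [ih (bits >>> 1) hlt base (b + 1) nrows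
            (if bits &&& 1 = 1 then (if base + (b : Int) < nrows then out ++ [base + (b : Int)] else out) else out),
          ih (bits >>> 1) hlt base (b + 1) nrows
            (if bits &&& 1 = 1 then (if base + (b : Int) < nrows then [] ++ [base + (b : Int)] else []) else [])]
      split_ifs <;> simp

-- a sorted list is empty iff the list is
theorem sorted_eq_nil_iff (xs : List Int) :
    PySem.List.sorted xs id = [] ↔ xs = [] := by
  have hp := PySem.List.sorted_perm xs id false
  constructor
  · intro h; rw [h] at hp; exact hp.symm.eq_nil
  · intro h; subst h; exact hp.eq_nil

-- the whole programs agree (unconditionally: both ports default alike on excluded inputs)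
theorem decode_deps_eq_alt (deps_buf : List Int) (ndeps : Int) (nrows : Int) :
    decode_deps deps_buf ndeps nrows = decode_deps_alt deps_buf ndeps nrows := by
  unfold decode_deps decode_deps_alt
  set nwords := PySem.Int.floordiv (nrows + 63) 64 with hnw
  set G : Int → List Int := fun d =>
    (PySem.List.pyRange 0 nwords 1).flatMap (fun w =>
      wordIndicesGo (PySem.List.pyGetD deps_buf (d * nwords + w) 0).toNat (64 * w) 0 nrows [])
    with hG
  have hinner : ∀ d : Int,
      (PySem.List.pyRange 0 nwords 1).foldl (fun indices w =>
        lsbInner (PySem.List.pyGetD deps_buf (d * nwords + w) 0).toNat (w * 64) nrows indices) []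
      = G d := by
    intro d
    rw [PySem.List.foldl_congr_mem _ _
        (fun indices w => indices ++
          wordIndicesGo (PySem.List.pyGetD deps_buf (d * nwords + w) 0).toNat (64 * w) 0 nrows [])
        []
        (by
          intro acc w _
          rw [lsbInner_eq_go, wordIndicesGo_acc, mul_comm w 64])]
    rw [PySem.List.foldl_append_eq_flatMap]
    simp [hG]
  have houter :
      (PySem.List.pyRange 0 ndeps 1).foldl (fun result d =>
        if G d ≠ [] then result ++ [PySem.List.sorted (G d) id] else result) []
      = ((PySem.List.pyRange 0 ndeps 1).map (fun d => PySem.List.sorted (G d) id)).filter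
          (fun r => decide (r ≠ [])) := by
    rw [PySem.List.foldl_congr_mem _ _
        (fun result d =>
          if (fun d => decide (PySem.List.sorted (G d) id ≠ [])) d = true
          then result ++ [(fun d => PySem.List.sorted (G d) id) d] else result)
        []
        (by
          intro acc d _
          by_cases hd : G d = []
          · have hnil : PySem.List.sorted ([] : List Int) id = [] :=
              (PySem.List.sorted_perm ([] : List Int) id false).eq_nil
            simp [hd, hnil]
          · have hs : PySem.List.sorted (G d) id ≠ [] := fun e => hd ((sorted_eq_nil_iff (G d)).mp e)
            simp [hd, hs])]
    rw [PySem.List.foldl_append_if, List.filter_map]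
    simp only [List.nil_append]
    rfl
  simp only [hinner]
  exact houter

-- ===== VERDICT (by name: the statement is the Claim_ definition above) =====
theorem decode_deps_spec : Claim_equal_decode_deps := by
  intro deps_buf ndeps nrows _ _
  unfold Spec_decode_deps
  exact decode_deps_eq_alt deps_buf ndeps nrows
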